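-- pv_equiv track=rewrite | github.com/arjecahn/cahn-family-assistent | src/task_engine.py | _select_days_with_spacing
-- ===== SOURCE A (Python) =====
-- MAX_TASKS_PER_DAY = 5
--
-- def _select_days_with_spacing(suitable_days: list, target: int,
--                                 min_spacing: int, day_task_count: dict = None) -> list:
--     """Selecteer dagen met minimale spacing ertussen EN load balancing.
--
--     Args:
--         suitable_days: Lijst van geschikte dag-indices
--         target: Hoeveel dagen we moeten selecteren
--         min_spacing: Minimale afstand tussen dagen
--         day_task_count: Optioneel - dict met taken per dag voor load balancing
--
--     Returns:
--         Lijst van geselecteerde dag-indices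
--     """
--     if not suitable_days:
--         return []
--
--     selected = []
--
--     # Filter eerst dagen die al vol zitten
--     if day_task_count:
--         available_days = [d for d in suitable_days if day_task_count.get(d, 0) < MAX_TASKS_PER_DAY]
--         # Sorteer op load (minste taken eerst)
--         sorted_days = sorted(available_days, key=lambda d: day_task_count.get(d, 0))
--     else:
--         sorted_days = sorted(suitable_days)
--
--     # Greedy selectie met spacing check, voorkeur voor minst belaste dagen
--     for day_idx in sorted_days:
--         if len(selected) >= target:
--             break
--
--         # Check spacing met al geselecteerde dagen
--         valid = True
--         for selected_day in selected:
--             if abs(day_idx - selected_day) < min_spacing: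
--                 valid = False
--                 break
--
--         if valid:
--             selected.append(day_idx)
--
--     # Als we niet genoeg dagen konden selecteren met spacing,
--     # accepteer wat we hebben (niet relaxen - regels zijn regels)
--     return sorted(selected)
-- ===== SOURCE B (Python) =====
-- MAX_TASKS_PER_DAY = 5
--
--
-- def _bisect_left(a, x):
--     """Leftmost insertion point of x in sorted list a (hand-rolled bisect)."""
--     lo, hi = 0, len(a)
--     while lo < hi:
--         mid = (lo + hi) // 2
--         if a[mid] < x:
--             lo = mid + 1
--         else:
--             hi = mid
--     return lo
--
--
-- def _select_days_with_spacing(suitable_days: list, target: int,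
--                               min_spacing: int, day_task_count: dict = None) -> list:
--     """Greedy day selection with spacing + load balancing; selected days are
--     kept in a sorted list so the spacing check is a binary search on the two
--     nearest neighbours instead of a scan over everything selected."""
--     if not suitable_days:
--         return []
--
--     if day_task_count:
--         days = sorted((d for d in suitable_days
--                        if day_task_count.get(d, 0) < MAX_TASKS_PER_DAY),
--                       key=lambda d: day_task_count.get(d, 0))
--     else:
--         days = sorted(suitable_days)
--
--     selected = []  # always kept in increasing day order
--     for day in days:
--         if len(selected) >= target:
--             break
--         i = _bisect_left(selected, day)
--         if i > 0 and day - selected[i - 1] < min_spacing: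
--             continue
--         if i < len(selected) and selected[i] - day < min_spacing:
--             continue
--         selected.insert(i, day)
--     return selected
-- ===== Notes on version B (the rewrite author's own statement) =====
-- stated objective: alternative
-- what changed: B keeps the selected days in a sorted list and replaces A's linear scan over all selected days (and A's final sort) by a hand-rolled binary search that checks only the two nearest bisection neighbours and inserts in place, so the list comes out already sorted.
import Mathlib
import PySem

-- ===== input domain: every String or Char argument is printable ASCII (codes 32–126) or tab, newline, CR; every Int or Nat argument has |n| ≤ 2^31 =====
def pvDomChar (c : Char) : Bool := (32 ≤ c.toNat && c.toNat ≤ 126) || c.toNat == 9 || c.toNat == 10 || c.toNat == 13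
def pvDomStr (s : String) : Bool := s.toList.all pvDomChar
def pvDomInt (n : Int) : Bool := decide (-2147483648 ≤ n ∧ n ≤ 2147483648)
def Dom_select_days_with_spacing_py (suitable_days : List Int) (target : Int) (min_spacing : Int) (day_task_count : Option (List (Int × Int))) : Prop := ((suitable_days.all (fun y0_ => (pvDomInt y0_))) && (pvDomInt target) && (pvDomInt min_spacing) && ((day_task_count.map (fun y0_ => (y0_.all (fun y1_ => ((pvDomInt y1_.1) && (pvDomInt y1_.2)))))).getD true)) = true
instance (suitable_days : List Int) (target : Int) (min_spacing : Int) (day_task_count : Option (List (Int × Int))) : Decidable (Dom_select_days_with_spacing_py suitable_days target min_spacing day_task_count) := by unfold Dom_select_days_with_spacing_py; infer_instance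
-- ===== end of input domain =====

-- B keeps the selected days in a sorted list: spacing is checked against only the two
-- bisection neighbours instead of scanning everything selected, and no final sort is needed.

-- ===== PORT A =====
-- inner 'for selected_day in selected' validity loop (break only affects speed)
def pvA_valid (min_spacing d : Int) (sel : List Int) : Bool :=
  sel.foldl (fun valid s => if |d - s| < min_spacing then false else valid) true

-- the greedy 'for day_idx in sorted_days' loop of A
def pvA_loop (target min_spacing : Int) : List Int → List Int → List Int
  | [], sel => sel
  | d :: rest, sel =>
    if target ≤ (sel.length : Int) then sel
    else if pvA_valid min_spacing d sel then pvA_loop target min_spacing rest (sel ++ [d])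
    else pvA_loop target min_spacing rest sel

def select_days_with_spacing_py (suitable_days : List Int) (target : Int) (min_spacing : Int) (day_task_count : Option (List (Int × Int))) : List Int :=
  if suitable_days = [] then []
  else
    let sorted_days :=
      match day_task_count with
      | some l =>
        if l = [] then PySem.List.sorted suitable_days (fun d => d) false
        else
          let dtc := PySem.Dict.ofList l
          let available_days := suitable_days.filter (fun d => decide (PySem.Dict.getD dtc d 0 < 5))
          PySem.List.sorted available_days (fun d => PySem.Dict.getD dtc d 0) false
      | none => PySem.List.sorted suitable_days (fun d => d) false
    PySem.List.sorted (pvA_loop target min_spacing sorted_days []) (fun d => d) false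

-- ===== PORT B =====
-- hand-rolled bisect_left of Source B, transliterated (lo/hi binary-search loop)
def pvB_bisect (a : List Int) (x : Int) (lo hi : Nat) : Nat :=
  if lo < hi then
    let mid := (lo + hi) / 2
    if a.getD mid 0 < x then pvB_bisect a x (mid + 1) hi else pvB_bisect a x lo mid
  else lo
termination_by hi - lo
decreasing_by all_goals omega

-- the greedy loop of Source B: selected kept sorted, neighbour checks, insert at i
def pvB_loop (target min_spacing : Int) : List Int → List Int → List Int
  | [], sel => sel
  | d :: rest, sel =>
    if target ≤ (sel.length : Int) then sel
    else
      let i := pvB_bisect sel d 0 sel.length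
      if 0 < i ∧ d - sel.getD (i - 1) 0 < min_spacing then pvB_loop target min_spacing rest sel
      else if i < sel.length ∧ sel.getD i 0 - d < min_spacing then pvB_loop target min_spacing rest sel
      else pvB_loop target min_spacing rest (sel.take i ++ d :: sel.drop i)

def select_days_with_spacing_py_alt (suitable_days : List Int) (target : Int) (min_spacing : Int) (day_task_count : Option (List (Int × Int))) : List Int :=
  if suitable_days = [] then []
  else
    let days :=
      match day_task_count with
      | some l =>
        if l = [] then PySem.List.sorted suitable_days (fun d => d) false
        else
          let dtc := PySem.Dict.ofList l
          PySem.List.sorted (suitable_days.filter (fun d => decide (PySem.Dict.getD dtc d 0 < 5)))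
            (fun d => PySem.Dict.getD dtc d 0) false
      | none => PySem.List.sorted suitable_days (fun d => d) false
    pvB_loop target min_spacing days []

-- ===== PRECONDITION & SPEC =====
def Spec_select_days_with_spacing_py (suitable_days : List Int) (target : Int) (min_spacing : Int) (day_task_count : Option (List (Int × Int))) (out : List Int) : Prop := out = select_days_with_spacing_py_alt suitable_days target min_spacing day_task_count
instance (suitable_days : List Int) (target : Int) (min_spacing : Int) (day_task_count : Option (List (Int × Int))) (out : List Int) : Decidable (Spec_select_days_with_spacing_py suitable_days target min_spacing day_task_count out) := by unfold Spec_select_days_with_spacing_py; infer_instance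

-- ===== CLAIM (what is proved, stated in full; the proofs are below) =====
def Claim_equal_select_days_with_spacing_py : Prop := ∀ (suitable_days : List Int) (target : Int) (min_spacing : Int) (day_task_count : Option (List (Int × Int))), Dom_select_days_with_spacing_py suitable_days target min_spacing day_task_count → Spec_select_days_with_spacing_py suitable_days target min_spacing day_task_count (select_days_with_spacing_py suitable_days target min_spacing day_task_count)

-- ===== LEMMAS AND PROOFS =====

lemma pvA_valid_eq_any (m d : Int) (sel : List Int) :
    pvA_valid m d sel = !sel.any (fun s => decide (|d - s| < m)) := by
  unfold pvA_valid
  rw [PySem.List.foldl_ite_false_eq]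
  simp
lemma pvB_bisect_spec (a : List Int) (x : Int) (hsort : a.Pairwise (· ≤ ·)) :
    ∀ n lo hi : Nat, hi - lo ≤ n → hi ≤ a.length → lo ≤ hi →
    (∀ j : Nat, j < lo → (h : j < a.length) → a[j] < x) →
    (∀ j : Nat, hi ≤ j → (h : j < a.length) → x ≤ a[j]) →
    lo ≤ pvB_bisect a x lo hi ∧ pvB_bisect a x lo hi ≤ hi ∧
      (∀ j : Nat, j < pvB_bisect a x lo hi → (h : j < a.length) → a[j] < x) ∧
      (∀ j : Nat, pvB_bisect a x lo hi ≤ j → (h : j < a.length) → x ≤ a[j]) := by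
  have mono : ∀ (i j : Nat) (hj : j < a.length) (hij : i ≤ j), a[i]'(lt_of_le_of_lt hij hj) ≤ a[j] := by
    intro i j hj hij
    rcases Nat.lt_or_ge i j with h | h
    · exact (List.pairwise_iff_getElem.mp hsort) i j (by omega) hj h
    · have : i = j := by omega
      subst this; rfl
  intro n
  induction n with
  | zero =>
    intro lo hi hn hhi hlo hb ha
    have h' : ¬ lo < hi := by omega
    rw [pvB_bisect, if_neg h']
    exact ⟨le_refl _, hlo, hb, fun j hj h => ha j (by omega) h⟩
  | succ n ih =>
    intro lo hi hn hhi hlo hb ha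
    by_cases hlt : lo < hi
    · rw [pvB_bisect, if_pos hlt]
      simp only []
      set mid := (lo + hi) / 2 with hmid
      have hm1 : lo ≤ mid := by omega
      have hm2 : mid < hi := by omega
      have hmlen : mid < a.length := by omega
      rw [List.getD_eq_getElem a 0 hmlen]
      by_cases hx : a[mid] < x
      · rw [if_pos hx]
        have r := ih (mid + 1) hi (by omega) hhi (by omega)
          (fun j hj h => by
            rcases Nat.lt_or_ge j mid with hj' | hj'
            · exact lt_of_le_of_lt (mono j mid hmlen (by omega)) hx
            · have : j = mid := by omega
              subst this; exact hx)
          ha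
        exact ⟨by omega, by omega, r.2.2.1, r.2.2.2⟩
      · rw [if_neg hx]
        have r := ih lo mid (by omega) (by omega) hm1 hb
          (fun j hj h => le_trans (not_lt.mp hx) (mono mid j h hj))
        exact ⟨r.1, by omega, r.2.2.1, r.2.2.2⟩
    · rw [pvB_bisect, if_neg hlt]
      exact ⟨le_refl _, hlo, hb, fun j hj h => ha j (by omega) h⟩
lemma check_eq (sel : List Int) (hsort : sel.Pairwise (· ≤ ·)) (d m : Int) :
    (sel.any (fun s => decide (|d - s| < m)) = true) ↔
      ((0 < pvB_bisect sel d 0 sel.length ∧ d - sel.getD (pvB_bisect sel d 0 sel.length - 1) 0 < m) ∨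
       (pvB_bisect sel d 0 sel.length < sel.length ∧ sel.getD (pvB_bisect sel d 0 sel.length) 0 - d < m)) := by
  obtain ⟨-, hle, hbelow, habove⟩ := pvB_bisect_spec sel d hsort sel.length 0 sel.length (by omega)
    (le_refl _) (Nat.zero_le _) (fun j hj h => absurd hj (by omega)) (fun j hj h => absurd hj (by omega))
  set i := pvB_bisect sel d 0 sel.length with hi
  have mono := List.pairwise_iff_getElem.mp hsort
  simp only [List.any_eq_true, decide_eq_true_eq]
  constructor
  · rintro ⟨s, hmem, habs⟩
    obtain ⟨j, hjlen, rfl⟩ := List.mem_iff_getElem.mp hmem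
    have habs' := abs_lt.mp habs
    rcases Nat.lt_or_ge j i with hj | hj
    · left
      have hi1 : i - 1 < sel.length := by omega
      refine ⟨by omega, ?_⟩
      rw [List.getD_eq_getElem sel 0 hi1]
      have h1 : sel[j] ≤ sel[i-1]'hi1 := by
        rcases Nat.lt_or_ge j (i-1) with h | h
        · exact mono j (i-1) hjlen hi1 h
        · have : j = i - 1 := by omega
          subst this; rfl
      omega
    · right
      have hilen : i < sel.length := by omega
      refine ⟨hilen, ?_⟩
      rw [List.getD_eq_getElem sel 0 hilen]
      have h1 : sel[i]'hilen ≤ sel[j] := by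
        rcases Nat.lt_or_ge i j with h | h
        · exact mono i j hilen hjlen h
        · have : i = j := by omega
          subst this; rfl
      omega
  · rintro (⟨hpos, hlt⟩ | ⟨hlen, hlt⟩)
    · have hi1 : i - 1 < sel.length := by omega
      rw [List.getD_eq_getElem sel 0 hi1] at hlt
      refine ⟨sel[i-1]'hi1, List.getElem_mem _, ?_⟩
      have := hbelow (i-1) (by omega) hi1
      rw [abs_lt]; omega
    · rw [List.getD_eq_getElem sel 0 hlen] at hlt
      refine ⟨sel[i]'hlen, List.getElem_mem _, ?_⟩
      have := habove i (le_refl _) hlen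
      rw [abs_lt]; omega
lemma insert_sorted (sel : List Int) (hsort : sel.Pairwise (· ≤ ·)) (d : Int) :
    (sel.take (pvB_bisect sel d 0 sel.length) ++ d :: sel.drop (pvB_bisect sel d 0 sel.length)).Pairwise (· ≤ ·) := by
  obtain ⟨-, hle, hbelow, habove⟩ := pvB_bisect_spec sel d hsort sel.length 0 sel.length (by omega)
    (le_refl _) (Nat.zero_le _) (fun j hj h => absurd hj (by omega)) (fun j hj h => absurd hj (by omega))
  set i := pvB_bisect sel d 0 sel.length with hidef
  rw [List.pairwise_append]
  refine ⟨hsort.sublist (List.take_sublist _ _), ?_, ?_⟩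
  · rw [List.pairwise_cons]
    refine ⟨?_, hsort.sublist (List.drop_sublist _ _)⟩
    intro y hy
    obtain ⟨j, hjlen, rfl⟩ := List.mem_iff_getElem.mp hy
    rw [List.getElem_drop]
    exact habove (i + j) (by omega) (by have := hjlen; simp [List.length_drop] at this; omega)
  · intro x hx y hy
    obtain ⟨j, hjlen, rfl⟩ := List.mem_iff_getElem.mp hx
    rw [List.getElem_take] at *
    have hjlen' : j < sel.length := by have := hjlen; simp [List.length_take] at this; omega
    have hji : j < i := by have := hjlen; simp [List.length_take] at this; omega
    have hxd : sel[j]'hjlen' < d := hbelow j hji hjlen'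
    rcases List.mem_cons.mp hy with rfl | hy'
    · exact le_of_lt hxd
    · obtain ⟨k, hklen, rfl⟩ := List.mem_iff_getElem.mp hy'
      rw [List.getElem_drop]
      have := habove (i + k) (by omega) (by have := hklen; simp [List.length_drop] at this; omega)
      omega
lemma insert_perm (sel other : List Int) (hperm : sel.Perm other) (d : Int) (i : Nat) :
    (sel.take i ++ d :: sel.drop i).Perm (other ++ [d]) := by
  have h1 : (sel.take i ++ d :: sel.drop i).Perm (d :: sel) := by
    have h := (List.perm_middle (a := d) (l₁ := sel.take i) (l₂ := sel.drop i))
    rwa [List.take_append_drop] at h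
  exact h1.trans ((hperm.cons d).trans (List.perm_append_singleton d other).symm)
lemma loop_eq (target m : Int) (days : List Int) :
    ∀ selA selB : List Int, selB.Perm selA → selB.Pairwise (· ≤ ·) →
    PySem.List.sorted (pvA_loop target m days selA) (fun d => d) false = pvB_loop target m days selB := by
  induction days with
  | nil =>
    intro selA selB hperm hsort
    exact PySem.List.sorted_id_eq_of_perm_of_pairwise _ _ hperm hsort
  | cons d rest ih =>
    intro selA selB hperm hsort
    rw [pvA_loop, pvB_loop]
    have hlen : selB.length = selA.length := hperm.length_eq
    by_cases hbrk : target ≤ (selA.length : Int)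
    · have hbrkB : target ≤ (selB.length : Int) := by rw [hlen]; exact hbrk
      rw [if_pos hbrk, if_pos hbrkB]
      exact PySem.List.sorted_id_eq_of_perm_of_pairwise _ _ hperm hsort
    · have hbrkB : ¬ target ≤ (selB.length : Int) := by rw [hlen]; exact hbrk
      rw [if_neg hbrk, if_neg hbrkB]
      simp only []
      rw [pvA_valid_eq_any, ← hperm.any_eq]
      by_cases hany : selB.any (fun s => decide (|d - s| < m)) = true
      · -- invalid: both skip
        rw [hany]
        have hc := (check_eq selB hsort d m).mp hany
        simp only [Bool.not_true, if_neg (by simp : ¬ (false = true))]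
        rcases hc with h1 | h2
        · rw [if_pos h1]
          exact ih selA selB hperm hsort
        · by_cases h1 : 0 < pvB_bisect selB d 0 selB.length ∧ d - selB.getD (pvB_bisect selB d 0 selB.length - 1) 0 < m
          · rw [if_pos h1]; exact ih selA selB hperm hsort
          · rw [if_neg h1, if_pos h2]; exact ih selA selB hperm hsort
      · -- valid: A appends, B inserts
        rw [Bool.not_eq_true] at hany
        rw [hany]
        simp only [Bool.not_false, if_true]
        have hc := (check_eq selB hsort d m)
        have h1 : ¬ (0 < pvB_bisect selB d 0 selB.length ∧ d - selB.getD (pvB_bisect selB d 0 selB.length - 1) 0 < m) := by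
          intro h; rw [hc.mpr (Or.inl h)] at hany; exact absurd hany (by simp)
        have h2 : ¬ (pvB_bisect selB d 0 selB.length < selB.length ∧ selB.getD (pvB_bisect selB d 0 selB.length) 0 - d < m) := by
          intro h; rw [hc.mpr (Or.inr h)] at hany; exact absurd hany (by simp)
        rw [if_neg h1, if_neg h2]
        exact ih (selA ++ [d]) _ (insert_perm selB selA hperm d _) (insert_sorted selB hsort d)

-- ===== VERDICT (by name: the statement is the Claim_ definition above) =====
theorem select_days_with_spacing_py_spec : Claim_equal_select_days_with_spacing_py := by
  intro suitable_days target min_spacing day_task_count _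
  unfold Spec_select_days_with_spacing_py select_days_with_spacing_py select_days_with_spacing_py_alt
  by_cases h : suitable_days = []
  · simp [h]
  · simp only [if_neg h]
    exact loop_eq _ _ _ [] [] (List.Perm.refl _) List.Pairwise.nil
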